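-- pv_equiv track=rewrite | github.com/ghleokim/algorithm | 200929/testtest.py | solution
-- ===== SOURCE A (Python) =====
-- def solution(A):
--     # write your code in Python 3.6
--     answer = 0
--     LARGE_NUM = 1000000000
--
--     N = len(A)
--     counts = [0 for _ in range(N)]
--
--     changable_number = []
--
--     for i in range(N):
--         target_index = A[i] - 1
--
--         if counts[target_index] == 0:
--             counts[target_index] += 1
--         else:
--             changable_number.append(target_index)
--
--     changable_number.sort()
--
--     ci = 0
--
--     for i in range(N):
--         if counts[i] == 1: continue
--
--         answer += abs(changable_number[ci] - i)
--         ci += 1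
--
--         if answer > LARGE_NUM:
--             return -1
--
--     return answer
-- ===== SOURCE B (Python) =====
-- def solution(A):
--     N = len(A)
--     seen = [False] * N
--     dups = []
--     for x in A:
--         if seen[x - 1]:
--             dups.append(x)
--         else:
--             seen[x - 1] = True
--     missing = [v for v in range(1, N + 1) if not seen[v - 1]]
--     # sweep line: +1 event per surplus value, -1 event per missing value;
--     # the total move cost is the |running balance| integrated over the gaps
--     delta = {}
--     for x in dups:
--         delta[x] = delta.get(x, 0) + 1
--     for v in missing:
--         delta[v] = delta.get(v, 0) - 1
--     cost = 0
--     bal = 0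
--     prev = None
--     for p in sorted(delta):
--         if prev is not None:
--             cost += abs(bal) * (p - prev)
--         bal += delta[p]
--         prev = p
--     return -1 if cost > 1000000000 else cost
-- ===== Notes on version B (the rewrite author's own statement) =====
-- stated objective: alternative
-- what changed: B never pairs duplicates with holes at all: it records +1/-1 events per surplus and per missing value and integrates the absolute running balance over the gaps between sorted event coordinates (a sweep line / 1-D transport computation), instead of A's sort-the-duplicates-and-sum-pairwise-distances loop with an early exit.
import Mathlib
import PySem

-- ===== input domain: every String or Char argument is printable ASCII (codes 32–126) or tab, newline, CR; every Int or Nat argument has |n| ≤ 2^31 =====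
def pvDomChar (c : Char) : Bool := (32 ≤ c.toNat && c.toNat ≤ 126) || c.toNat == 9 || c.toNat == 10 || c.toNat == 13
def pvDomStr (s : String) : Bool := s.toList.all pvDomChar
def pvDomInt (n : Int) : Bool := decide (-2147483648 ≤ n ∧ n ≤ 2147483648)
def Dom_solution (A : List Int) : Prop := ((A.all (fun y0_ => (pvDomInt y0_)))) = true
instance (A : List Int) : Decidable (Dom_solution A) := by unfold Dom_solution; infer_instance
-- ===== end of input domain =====

-- B replaces A's pair-the-sorted-duplicates-with-holes summation by a sweep line over
-- +1/-1 value events integrating the absolute running balance; proved to return the same value.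

-- ===== PORT A =====
def solution (A : List Int) : Int :=
  let LARGE_NUM : Int := 1000000000
  let N : Int := PySem.List.len A
  let counts : List Int := (PySem.List.pyRange 0 N 1).map (fun _ => 0)
  -- first loop: for i in range(N), state (counts, changable_number)
  let st := (PySem.List.pyRange 0 N 1).foldl (fun (st : List Int × List Int) i =>
      let target := PySem.List.pyGetD A i 0 - 1
      if PySem.List.pyGetD st.1 target 0 == 0 then
        (PySem.List.pySetD st.1 target (PySem.List.pyGetD st.1 target 0 + 1), st.2)
      else
        (st.1, st.2 ++ [target])) (counts, [])
  let counts1 := st.1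
  let changable := PySem.List.sorted st.2 (fun x => x) false
  -- second loop with early return -1 modelled by Option state (answer, ci); none = returned -1
  let fin := (PySem.List.pyRange 0 N 1).foldl (fun (acc : Option (Int × Int)) i =>
      match acc with
      | none => none
      | some (answer, ci) =>
        if PySem.List.pyGetD counts1 i 0 == 1 then some (answer, ci)
        else
          let answer := answer + |PySem.List.pyGetD changable ci 0 - i|
          let ci := ci + 1
          if LARGE_NUM < answer then none else some (answer, ci)) (some (0, 0))
  match fin with
  | none => -1
  | some (answer, _) => answer

-- ===== PORT B =====
def solution_alt (A : List Int) : Int :=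
  let N : Int := PySem.List.len A
  -- seen = [False]*N, dups = []; one pass over A
  let st := A.foldl (fun (st : List Bool × List Int) x =>
      if PySem.List.pyGetD st.1 (x - 1) false then
        (st.1, st.2 ++ [x])
      else
        (PySem.List.pySetD st.1 (x - 1) true, st.2)) (PySem.List.pyRepeat [false] N, [])
  let seen := st.1
  let dups := st.2
  let missing := (PySem.List.pyRange 1 (N + 1) 1).filter
      (fun v => !(PySem.List.pyGetD seen (v - 1) false))
  -- delta: +1 event per duplicate value, -1 per missing value
  let delta := missing.foldl (fun d v => d.modify v 0 (· - 1))
      (dups.foldl (fun d x => d.modify x 0 (· + 1)) (PySem.Dict.empty : PySem.Dict Int Int))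
  -- sweep the sorted event coordinates, integrating |balance| over the gaps
  let fin := (PySem.List.sorted delta.keys (fun k => k) false).foldl
      (fun (acc : Int × Int × Option Int) p =>
        let cost := match acc.2.2 with
          | none => acc.1
          | some prev => acc.1 + |acc.2.1| * (p - prev)
        (cost, (acc.2.1 + delta.getD p 0, some p))) (0, (0, none))
  if 1000000000 < fin.1 then -1 else fin.1

-- ===== PRECONDITION & SPEC =====
-- Pre_ excludes exactly the inputs on which A raises IndexError: some element x with
-- x - 1 outside the Python index range [-N, N-1] of the length-N list counts.
def Pre_solution (A : List Int) : Prop := ∀ x ∈ A, 1 - (A.length : Int) ≤ x ∧ x ≤ (A.length : Int)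
instance (A : List Int) : Decidable (Pre_solution A) := by unfold Pre_solution; infer_instance
def pvWitness_solution : List Int := [3, 0, 3]
def Spec_solution (A : List Int) (out : Int) : Prop := out = solution_alt A
instance (A : List Int) (out : Int) : Decidable (Spec_solution A out) := by unfold Spec_solution; infer_instance

-- ===== CLAIM (what is proved, stated in full; the proofs are below) =====
def Claim_equal_solution : Prop := ∀ (A : List Int), Dom_solution A → Pre_solution A → Spec_solution A (solution A)

-- ===== LEMMAS AND PROOFS =====

-- 0/1 indicator as an Int
def pvInd (c : Prop) [Decidable c] : Int := if c then 1 else 0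

-- bool → {0,1}
def pvB2I (b : Bool) : Int := if b then 1 else 0

-- canonical (wrapped) Python index into a length-n list
def pvCanon (n : Nat) (r : Int) : Nat := (if r < 0 then r + n else r).toNat

-- the loop bodies of the two first-phase folds (proof-side names for the ports' step functions)
def pvStepA (st : List Int × List Int) (x : Int) : List Int × List Int :=
  let target := x - 1
  if PySem.List.pyGetD st.1 target 0 == 0 then
    (PySem.List.pySetD st.1 target (PySem.List.pyGetD st.1 target 0 + 1), st.2)
  else
    (st.1, st.2 ++ [target])

def pvStepB (st : List Bool × List Int) (x : Int) : List Bool × List Int :=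
  if PySem.List.pyGetD st.1 (x - 1) false then
    (st.1, st.2 ++ [x])
  else
    (PySem.List.pySetD st.1 (x - 1) true, st.2)

-- simulation invariant between the two first-phase states (n = len(A), m = #elements processed)
def pvRel (n m : Nat) (sa : List Int × List Int) (sb : List Bool × List Int) : Prop :=
  sa.1 = sb.1.map pvB2I ∧ sa.2 = sb.2.map (· - 1) ∧ sb.1.length = n ∧
  (∀ x ∈ sb.2, 1 - (n : Int) ≤ x ∧ x ≤ (n : Int)) ∧
  sb.2.length + sb.1.count true = m

lemma pvCanon_lt (n : Nat) (r : Int) (h1 : -(n : Int) ≤ r) (h2 : r < (n : Int)) :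
    pvCanon n r < n := by
  unfold pvCanon; split <;> omega

lemma pvGetD_canon {α : Type} [Inhabited α] (xs : List α) (r : Int) (d : α)
    (h1 : -(xs.length : Int) ≤ r) (h2 : r < (xs.length : Int)) :
    PySem.List.pyGetD xs r d = xs.getD (pvCanon xs.length r) d := by
  rcases lt_or_ge r 0 with hneg | hpos
  · have hk : r = -(((-r).toNat : Nat) : Int) := by omega
    rw [hk, PySem.List.pyGetD_neg_natCast _ _ _ (by omega) (by omega)]
    unfold pvCanon
    rw [List.getD_eq_getElem _ _ (by split <;> omega)]
    congr 1
    split <;> omega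
  · rw [PySem.List.pyGetD_eq_getElem _ _ hpos h2]
    unfold pvCanon
    rw [List.getD_eq_getElem _ _ (by split <;> omega)]
    congr 1
    split <;> omega

lemma pvSetD_canon {α : Type} (xs : List α) (r : Int) (v : α)
    (h1 : -(xs.length : Int) ≤ r) (h2 : r < (xs.length : Int)) :
    PySem.List.pySetD xs r v = xs.set (pvCanon xs.length r) v := by
  unfold PySem.List.pySetD PySem.List.pySet? PySem.List.pyIdx? pvCanon
  rcases lt_or_ge r 0 with hneg | hpos
  · rw [if_neg (by omega), if_pos (by omega)]
    simp only [Option.map_some, Option.getD_some]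
    congr 1
    omega
  · rw [if_pos (by omega), if_pos (by omega)]
    simp only [Option.map_some, Option.getD_some]
    congr 1
    omega

lemma pvMap_pySetD {α β : Type} (f : α → β) (xs : List α) (i : Int) (v : α) :
    (PySem.List.pySetD xs i v).map f = PySem.List.pySetD (xs.map f) i (f v) := by
  unfold PySem.List.pySetD PySem.List.pySet? PySem.List.pyIdx?
  simp only [List.length_map]
  split
  · split
    · simp [List.map_set]
    · simp
  · split
    · simp [List.map_set]
    · simp

lemma pvGetD_map_b2i (xs : List Bool) (i : Int) :
    PySem.List.pyGetD (xs.map pvB2I) i 0 = pvB2I (PySem.List.pyGetD xs i false) := by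
  have := PySem.List.pyGetD_map pvB2I xs i false
  simpa [pvB2I] using this

lemma pvCount_set_true (bs : List Bool) (c : Nat) (hc : c < bs.length) (hv : bs.getD c false = false) :
    (bs.set c true).count true = bs.count true + 1 := by
  rw [List.getD_eq_getElem _ _ hc] at hv
  rw [List.set_eq_take_append_cons_drop, if_pos hc]
  conv_rhs => rw [show bs = bs.take c ++ bs[c] :: bs.drop (c+1) by
    conv_lhs => rw [← List.take_append_drop c bs]
    rw [← List.getElem_cons_drop hc]]
  simp [List.count_append, hv]
  omega

lemma pvStep_sim (n m : Nat) (sa : List Int × List Int) (sb : List Bool × List Int)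
    (x : Int) (hx : 1 - (n : Int) ≤ x ∧ x ≤ (n : Int)) (h : pvRel n m sa sb) :
    pvRel n (m + 1) (pvStepA sa x) (pvStepB sb x) := by
  obtain ⟨hMap, hChg, hLb, hMem, hLen⟩ := h
  have hr1 : -(n : Int) ≤ x - 1 := by omega
  have hr2 : x - 1 < (n : Int) := by omega
  have hc := pvCanon_lt n (x - 1) hr1 hr2
  unfold pvStepA pvStepB
  simp only [hMap, pvGetD_map_b2i, beq_iff_eq]
  by_cases hhit : PySem.List.pyGetD sb.1 (x - 1) false
  · rw [if_neg (by simp [hhit, pvB2I]), if_pos hhit]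
    refine ⟨rfl, by simp [hChg], hLb, ?_, ?_⟩
    · intro v hv
      rcases List.mem_append.mp hv with h' | h'
      · exact hMem v h'
      · simp at h'; subst h'; exact hx
    · dsimp only
      simp only [List.length_append, List.length_cons, List.length_nil]
      omega
  · rw [if_pos (by simp [hhit, pvB2I]), if_neg hhit]
    have hgb : PySem.List.pyGetD sb.1 (x - 1) false = sb.1.getD (pvCanon n (x - 1)) false := by
      rw [pvGetD_canon _ _ _ (by rw [hLb]; exact hr1) (by rw [hLb]; exact hr2), hLb]
    have hsb : PySem.List.pySetD sb.1 (x - 1) true = sb.1.set (pvCanon n (x - 1)) true := by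
      rw [pvSetD_canon _ _ _ (by rw [hLb]; exact hr1) (by rw [hLb]; exact hr2), hLb]
    refine ⟨?_, hChg, by simp [hsb, hLb], hMem, ?_⟩
    · dsimp only
      rw [pvMap_pySetD]
      congr 1
      simp only [Bool.not_eq_true] at hhit
      rw [hhit]
      simp [pvB2I]
    · dsimp only
      rw [hsb, pvCount_set_true _ _ (by rw [hLb]; exact hc) (by rw [← hgb]; simpa using hhit)]
      omega

lemma pvFold_sim (P : List Int) (n m : Nat) (sa : List Int × List Int)
    (sb : List Bool × List Int)
    (hP : ∀ x ∈ P, 1 - (n : Int) ≤ x ∧ x ≤ (n : Int)) (h : pvRel n m sa sb) :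
    pvRel n (m + P.length) (P.foldl pvStepA sa) (P.foldl pvStepB sb) := by
  induction P generalizing m sa sb with
  | nil => simpa using h
  | cons p t ih =>
    have := ih (m + 1) _ _ (fun x hx => hP x (by simp [hx]))
      (pvStep_sim n m sa sb p (hP p (by simp)) h)
    simpa [Nat.add_assoc, Nat.add_comm 1 t.length] using this

-- second phase: early-exit accumulation over the holes equals whole-sum-then-threshold
lemma pvFoldNone (E t : List Int) :
    t.foldl (fun (acc : Option (Int × Int)) i =>
      match acc with
      | none => none
      | some (answer, ci) =>
        let answer := answer + |PySem.List.pyGetD E ci 0 - i|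
        let ci := ci + 1
        if (1000000000 : Int) < answer then none else some (answer, ci)) none = none := by
  induction t with
  | nil => rfl
  | cons u v ihv => simpa using ihv

lemma pvLoop2 (E : List Int) (hs : List Int) (k : Nat) (a : Int)
    (hlen : k + hs.length ≤ E.length) (ha : a ≤ 1000000000) :
    hs.foldl (fun (acc : Option (Int × Int)) i =>
      match acc with
      | none => none
      | some (answer, ci) =>
        let answer := answer + |PySem.List.pyGetD E ci 0 - i|
        let ci := ci + 1
        if (1000000000 : Int) < answer then none else some (answer, ci)) (some (a, (k : Int))) =
      (if (1000000000 : Int) < a + ((hs.zip (E.drop k)).map (fun p => |p.2 - p.1|)).sum then none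
       else some (a + ((hs.zip (E.drop k)).map (fun p => |p.2 - p.1|)).sum, (k : Int) + hs.length)) := by
  induction hs generalizing k a with
  | nil =>
    simp only [List.foldl_nil, List.zip_nil_left, List.map_nil, List.sum_nil, add_zero,
      List.length_nil, Nat.cast_zero]
    rw [if_neg (by omega)]
  | cons h t ih =>
    have hk : k < E.length := by simp at hlen; omega
    have hgd : PySem.List.pyGetD E (k : Int) 0 = E[k] := PySem.List.pyGetD_ofNat E k 0 hk
    have hdrop : E.drop k = E[k] :: E.drop (k + 1) := (List.getElem_cons_drop hk).symm
    rw [List.foldl_cons, hdrop]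
    simp only [List.zip_cons_cons, List.map_cons, List.sum_cons, hgd]
    have hrest : 0 ≤ ((t.zip (E.drop (k + 1))).map (fun p => |p.2 - p.1|)).sum := by
      apply List.sum_nonneg
      intro y hy
      simp only [List.mem_map] at hy
      obtain ⟨p, _, hp⟩ := hy
      rw [← hp]; positivity
    show (List.foldl _ (if (1000000000 : Int) < a + |E[k] - h| then none else some (a + |E[k] - h|, (k : Int) + 1)) t) = _
    by_cases hbig : (1000000000 : Int) < a + |E[k] - h|
    · rw [if_pos hbig]
      rw [pvFoldNone, if_pos (by omega)]
    · rw [if_neg hbig]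
      have hcast : ((k : Int) + 1) = ((k + 1 : Nat) : Int) := by push_cast; ring
      rw [hcast]
      refine (ih (k + 1) (a + |E[k] - h|) (by simp at hlen ⊢; omega) (by omega)).trans ?_
      split <;> split
      · rfl
      · omega
      · omega
      · rename_i h1 h2
        congr 1
        simp only [Prod.mk.injEq]
        constructor
        · ring
        · simp only [List.length_cons]; push_cast; ring

-- bridges and bookkeeping used only by the final assembly
lemma pvFoldA_bridge (A : List Int) (init : List Int × List Int) :
    (PySem.List.pyRange 0 (A.length : Int) 1).foldl (fun (st : List Int × List Int) i =>
      let target := PySem.List.pyGetD A i 0 - 1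
      if PySem.List.pyGetD st.1 target 0 == 0 then
        (PySem.List.pySetD st.1 target (PySem.List.pyGetD st.1 target 0 + 1), st.2)
      else
        (st.1, st.2 ++ [target])) init = A.foldl pvStepA init :=
  PySem.List.foldl_pyRange_zero_pyGetD' A 0 pvStepA init

lemma pvBody_eq (C E : List Int) :
    (fun (acc : Option (Int × Int)) (i : Int) =>
      match acc with
      | none => none
      | some (answer, ci) =>
        if PySem.List.pyGetD C i 0 == 1 then some (answer, ci)
        else
          let answer := answer + |PySem.List.pyGetD E ci 0 - i|
          let ci := ci + 1
          if (1000000000 : Int) < answer then none else some (answer, ci)) =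
    (fun (acc : Option (Int × Int)) (i : Int) =>
      if !(PySem.List.pyGetD C i 0 == 1) then
        (fun (acc : Option (Int × Int)) (i : Int) =>
          match acc with
          | none => none
          | some (answer, ci) =>
            let answer := answer + |PySem.List.pyGetD E ci 0 - i|
            let ci := ci + 1
            if (1000000000 : Int) < answer then none else some (answer, ci)) acc i
      else acc) := by
  funext acc i
  cases acc with
  | none => cases h : (PySem.List.pyGetD C i 0 == 1) <;> simp
  | some p =>
    obtain ⟨a, c⟩ := p
    cases h : (PySem.List.pyGetD C i 0 == 1) <;> simp

lemma pvCountP_range (bs : List Bool) :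
    (List.range bs.length).countP (fun k => !(bs.getD k false)) = bs.count false := by
  conv_rhs => rw [show bs = (List.range bs.length).map (fun k => bs.getD k false) by
    apply List.ext_getElem
    · simp
    · intro i h1 h2
      simp [List.getElem?_eq_getElem h1]]
  rw [List.count, List.countP_map]
  apply List.countP_congr
  intro k hk
  cases h : bs.getD k false <;> simp [show bs[k]?.getD false = _ from h]

-- ---- dict lemmas ----
lemma pvGetD_foldl_modify_sub_one (l : List Int) (d : PySem.Dict Int Int) (v : Int) :
    (l.foldl (fun d x => d.modify x 0 (· - 1)) d).getD v 0 = d.getD v 0 - l.count v := by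
  induction l generalizing d with
  | nil => simp
  | cons x t ih =>
    rw [List.foldl_cons, ih, PySem.Dict.getD_modify]
    by_cases hv : v = x
    · subst hv; simp; ring
    · rw [if_neg hv, List.count_cons, if_neg (by simpa using Ne.symm hv)]
      push_cast; ring

-- ---- sum plumbing ----
lemma pvSumMapSub {α : Type} (l : List α) (f g : α → Int) :
    (l.map (fun x => f x - g x)).sum = (l.map f).sum - (l.map g).sum := by
  induction l with
  | nil => simp
  | cons x t ih => simp [ih]; ring

lemma pvSumMapAdd {α : Type} (l : List α) (f g : α → Int) :
    (l.map (fun x => f x + g x)).sum = (l.map f).sum + (l.map g).sum := by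
  induction l with
  | nil => simp
  | cons x t ih => simp [ih]; ring

lemma pvSumComm {α β : Type} (L : List α) (R : List β) (g : α → β → Int) :
    (L.map (fun x => (R.map (g x)).sum)).sum = (R.map (fun y => (L.map (fun x => g x y)).sum)).sum := by
  induction L with
  | nil => simp
  | cons x t ih =>
    simp only [List.map_cons, List.sum_cons, ih]
    rw [pvSumMapAdd]

-- ---- range indicator ----
lemma pvSumConst (l : List Int) (c : Int) : (l.map (fun _ => c)).sum = l.length * c := by
  induction l with
  | nil => simp
  | cons x t ih => simp [ih]; ring

lemma pvRangeIndicator (lo hi c1 c2 : Int) (h1 : lo ≤ c1) (h2 : c1 ≤ c2) (h3 : c2 ≤ hi) :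
    ((PySem.List.pyRange lo hi 1).map (fun t => pvInd (c1 ≤ t ∧ t < c2))).sum = c2 - c1 := by
  rw [PySem.List.pyRange_one_append lo c1 hi (by omega) (by omega),
    PySem.List.pyRange_one_append c1 c2 hi (by omega) (by omega)]
  simp only [List.map_append, List.sum_append]
  have e1 : ((PySem.List.pyRange lo c1 1).map (fun t => pvInd (c1 ≤ t ∧ t < c2))).sum = 0 := by
    apply List.sum_eq_zero
    intro y hy
    simp only [List.mem_map] at hy
    obtain ⟨t, ht, hty⟩ := hy
    have := PySem.List.mem_pyRange_one.mp ht
    rw [← hty]; unfold pvInd; rw [if_neg (by omega)]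
  have e3 : ((PySem.List.pyRange c2 hi 1).map (fun t => pvInd (c1 ≤ t ∧ t < c2))).sum = 0 := by
    apply List.sum_eq_zero
    intro y hy
    simp only [List.mem_map] at hy
    obtain ⟨t, ht, hty⟩ := hy
    have := PySem.List.mem_pyRange_one.mp ht
    rw [← hty]; unfold pvInd; rw [if_neg (by omega)]
  have e2 : ((PySem.List.pyRange c1 c2 1).map (fun t => pvInd (c1 ≤ t ∧ t < c2))).sum = c2 - c1 := by
    rw [List.map_congr_left (g := fun _ => (1 : Int)) (fun t ht => by
      have := PySem.List.mem_pyRange_one.mp ht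
      unfold pvInd; rw [if_pos (by omega)])]
    rw [pvSumConst, PySem.List.length_pyRange_one]
    omega
  rw [e1, e2, e3]; ring

lemma pvAbsAsRange (x y lo hi : Int) (hx1 : lo ≤ x) (hx2 : x < hi) (hy1 : lo ≤ y) (hy2 : y < hi) :
    |x - y| = ((PySem.List.pyRange lo hi 1).map (fun t => |pvInd (x ≤ t) - pvInd (y ≤ t)|)).sum := by
  have key : ∀ t : Int, |pvInd (x ≤ t) - pvInd (y ≤ t)| = pvInd (min x y ≤ t ∧ t < max x y) := by
    intro t
    unfold pvInd
    rcases le_total x y with h | h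
    · rw [min_eq_left h, max_eq_right h]
      split_ifs <;> first | (exfalso; omega) | norm_num
    · rw [min_eq_right h, max_eq_left h]
      split_ifs <;> first | (exfalso; omega) | norm_num
  rw [List.map_congr_left (fun t _ => key t), pvRangeIndicator lo hi (min x y) (max x y)
    (le_min hx1 hy1) min_le_max (le_of_lt (max_lt hx2 hy2))]
  rcases le_total x y with h | h
  · rw [min_eq_left h, max_eq_right h, abs_of_nonpos (by omega)]; ring
  · rw [min_eq_right h, max_eq_left h, abs_of_nonneg (by omega)]
  
-- ---- no sign mixing over a componentwise-monotone zip ----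
lemma pvZipPairwise (b a : List Int) (hb : b.Pairwise (· ≤ ·)) (ha : a.Pairwise (· ≤ ·)) :
    (b.zip a).Pairwise (fun p q => p.1 ≤ q.1 ∧ p.2 ≤ q.2) := by
  induction b generalizing a with
  | nil => simp
  | cons x bt ih =>
    cases a with
    | nil => simp
    | cons y at_ =>
      rw [List.pairwise_cons] at hb ha
      rw [List.zip_cons_cons, List.pairwise_cons]
      refine ⟨?_, ih at_ hb.2 ha.2⟩
      intro p hp
      obtain ⟨h1, h2⟩ := List.of_mem_zip hp
      exact ⟨hb.1 _ h1, ha.1 _ h2⟩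

lemma pvSumNonpos (l : List Int) (h : ∀ x ∈ l, x ≤ 0) : l.sum ≤ 0 := by
  induction l with
  | nil => simp
  | cons x t ih =>
    rw [List.sum_cons]
    have := h x (by simp)
    have := ih (fun y hy => h y (by simp [hy]))
    omega

lemma pvAbsSum (t : Int) (l : List (Int × Int))
    (h : l.Pairwise (fun p q => p.1 ≤ q.1 ∧ p.2 ≤ q.2)) :
    (l.map (fun p => |pvInd (p.2 ≤ t) - pvInd (p.1 ≤ t)|)).sum
      = |(l.map (fun p => pvInd (p.2 ≤ t) - pvInd (p.1 ≤ t))).sum| := by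
  induction l with
  | nil => simp
  | cons p rest ih =>
    rw [List.pairwise_cons] at h
    have ihr := ih h.2
    simp only [List.map_cons, List.sum_cons]
    by_cases hp2 : p.2 ≤ t
    · by_cases hp1 : p.1 ≤ t
      · have hv : pvInd (p.2 ≤ t) - pvInd (p.1 ≤ t) = 0 := by
          unfold pvInd; rw [if_pos hp2, if_pos hp1]; ring
        rw [hv, ihr]; simp
      · -- head contributes +1; every later pair q has q.1 ≥ p.1 > t, so its term is ≥ 0
        have hv : pvInd (p.2 ≤ t) - pvInd (p.1 ≤ t) = 1 := by
          unfold pvInd; rw [if_pos hp2, if_neg hp1]; ring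
        have hS : 0 ≤ (rest.map (fun q => pvInd (q.2 ≤ t) - pvInd (q.1 ≤ t))).sum := by
          apply List.sum_nonneg
          intro y hy
          obtain ⟨q, hq, rfl⟩ := List.mem_map.mp hy
          have hle := (h.1 q hq).1
          have hn : ¬ q.1 ≤ t := by omega
          unfold pvInd
          rw [if_neg hn]
          split <;> omega
        rw [hv, ihr, abs_of_nonneg hS, abs_of_nonneg (by omega : (0:Int) ≤ 1),
          abs_of_nonneg (by omega)]
    · by_cases hp1 : p.1 ≤ t
      · -- head contributes -1; every later pair q has q.2 ≥ p.2 > t, so its term is ≤ 0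
        have hv : pvInd (p.2 ≤ t) - pvInd (p.1 ≤ t) = -1 := by
          unfold pvInd; rw [if_neg hp2, if_pos hp1]; ring
        have hS : (rest.map (fun q => pvInd (q.2 ≤ t) - pvInd (q.1 ≤ t))).sum ≤ 0 := by
          apply pvSumNonpos
          intro y hy
          obtain ⟨q, hq, rfl⟩ := List.mem_map.mp hy
          have hle := (h.1 q hq).2
          have hn : ¬ q.2 ≤ t := by omega
          unfold pvInd
          rw [if_neg hn]
          split <;> omega
        rw [hv, ihr, abs_of_nonpos hS, abs_of_nonpos (by omega : (-1:Int) ≤ 0),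
          abs_of_nonpos (by omega)]
        ring
      · have hv : pvInd (p.2 ≤ t) - pvInd (p.1 ≤ t) = 0 := by
          unfold pvInd; rw [if_neg hp2, if_neg hp1]; ring
        rw [hv, ihr]; simp

-- countP along the second/first components of a zip of equal length
lemma pvZipSndCount (b a : List Int) (h : b.length = a.length) (t : Int) :
    ((b.zip a).map (fun p => pvInd (p.2 ≤ t))).sum = (a.countP (fun x => decide (x ≤ t)) : Int) := by
  induction b generalizing a with
  | nil => cases a <;> simp_all
  | cons x bt ih =>
    cases a with
    | nil => simp_all
    | cons y at_ =>
      simp only [List.zip_cons_cons, List.map_cons, List.sum_cons, List.countP_cons]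
      rw [ih at_ (by simpa using h)]
      unfold pvInd
      by_cases hy : y ≤ t <;> simp [hy] <;> push_cast <;> ring

lemma pvZipFstCount (b a : List Int) (h : b.length = a.length) (t : Int) :
    ((b.zip a).map (fun p => pvInd (p.1 ≤ t))).sum = (b.countP (fun x => decide (x ≤ t)) : Int) := by
  induction b generalizing a with
  | nil => simp
  | cons x bt ih =>
    cases a with
    | nil => simp_all
    | cons y at_ =>
      simp only [List.zip_cons_cons, List.map_cons, List.sum_cons, List.countP_cons]
      rw [ih at_ (by simpa using h)]
      unfold pvInd
      by_cases hx : x ≤ t <;> simp [hx] <;> push_cast <;> ring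

-- the 1-D transport identity: pairing two sorted equal-length lists in order equals
-- integrating |difference of the counting functions| over a covering range
lemma pvWasserstein (a b : List Int) (lo hi : Int)
    (ha : a.Pairwise (· ≤ ·)) (hb : b.Pairwise (· ≤ ·)) (hlen : b.length = a.length)
    (hba : ∀ x ∈ a, lo ≤ x ∧ x < hi) (hbb : ∀ x ∈ b, lo ≤ x ∧ x < hi) :
    ((b.zip a).map (fun p => |p.2 - p.1|)).sum
      = ((PySem.List.pyRange lo hi 1).map
          (fun t => |(a.countP (fun x => decide (x ≤ t)) : Int)
                      - (b.countP (fun x => decide (x ≤ t)) : Int)|)).sum := by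
  have step1 : ((b.zip a).map (fun p => |p.2 - p.1|)).sum
      = ((b.zip a).map (fun p =>
          ((PySem.List.pyRange lo hi 1).map (fun t => |pvInd (p.2 ≤ t) - pvInd (p.1 ≤ t)|)).sum)).sum := by
    apply congrArg
    apply List.map_congr_left
    intro p hp
    obtain ⟨h1, h2⟩ := List.of_mem_zip hp
    exact pvAbsAsRange p.2 p.1 lo hi (hba _ h2).1 (hba _ h2).2 (hbb _ h1).1 (hbb _ h1).2
  rw [step1, pvSumComm]
  apply congrArg
  apply List.map_congr_left
  intro t _
  rw [pvAbsSum t _ (pvZipPairwise b a hb ha)]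
  congr 1
  rw [show (fun p : Int × Int => pvInd (p.2 ≤ t) - pvInd (p.1 ≤ t))
      = (fun p : Int × Int => (fun q : Int × Int => pvInd (q.2 ≤ t)) p - (fun q : Int × Int => pvInd (q.1 ≤ t)) p) from rfl,
    pvSumMapSub, pvZipSndCount b a hlen, pvZipFstCount b a hlen]

-- the default-last of a nonempty list is a member
lemma pvGetLastD_mem (a d : Int) (l : List Int) : (a :: l).getLastD d ∈ a :: l := by
  rw [List.getLastD_eq_getLast?]
  cases hl : (a :: l).getLast? with
  | none => simp [List.getLast?_eq_none_iff] at hl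
  | some z => simpa using List.mem_of_getLast? hl

lemma pvGetLastD_cons (k d : Int) (K' : List Int) : (k :: K').getLastD d = K'.getLastD k := by
  cases K' with
  | nil => simp
  | cons a l =>
    rw [List.getLastD_eq_getLast?, List.getLastD_eq_getLast?, List.getLast?_cons_cons]
    obtain ⟨z, hz⟩ : ∃ z, (a :: l).getLast? = some z := by
      cases hl : (a :: l).getLast? with
      | none => simp [List.getLast?_eq_none_iff] at hl
      | some z => exact ⟨z, rfl⟩
    rw [hz]
    rfl

-- ---- the sweep fold ----
lemma pvSweep (δ : Int → Int) (K : List Int) (c0 b0 p0 : Int)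
    (hgt : ∀ k ∈ K, p0 < k) (hK : K.Pairwise (· < ·)) :
    (K.foldl (fun (acc : Int × Int × Option Int) p =>
        (match acc.2.2 with
         | none => acc.1
         | some prev => acc.1 + |acc.2.1| * (p - prev),
         (acc.2.1 + δ p, some p))) (c0, (b0, some p0))).1
    = c0 + ((PySem.List.pyRange p0 (K.getLastD p0) 1).map
        (fun t => |b0 + ((K.filter (fun k => decide (k ≤ t))).map δ).sum|)).sum := by
  induction K generalizing c0 b0 p0 with
  | nil => simp [PySem.List.pyRange_one_eq_nil (le_refl p0)]
  | cons k K' ih =>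
    rw [List.pairwise_cons] at hK
    have hp0k : p0 < k := hgt k (by simp)
    have hL : k ≤ K'.getLastD k := by
      cases hc : K' with
      | nil => simp
      | cons a l =>
        have hmem : (a :: l).getLastD k ∈ K' := by rw [hc]; exact pvGetLastD_mem a k l
        have := hK.1 _ hmem
        omega
    rw [List.foldl_cons]
    have := ih (c0 + |b0| * (k - p0)) (b0 + δ k) k (fun k' hk' => hK.1 k' hk') hK.2
    simp only at this ⊢
    rw [this]
    have hlast : (k :: K').getLastD p0 = K'.getLastD k := pvGetLastD_cons k p0 K'
    rw [hlast, PySem.List.pyRange_one_append p0 k (K'.getLastD k) (by omega) hL]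
    simp only [List.map_append, List.sum_append]
    have e1 : ((PySem.List.pyRange p0 k 1).map
        (fun t => |b0 + (((k :: K').filter (fun k => decide (k ≤ t))).map δ).sum|)).sum
        = |b0| * (k - p0) := by
      rw [List.map_congr_left (g := fun _ => |b0|) (fun t ht => by
        have htr := PySem.List.mem_pyRange_one.mp ht
        have : ((k :: K').filter (fun k => decide (k ≤ t))) = [] := by
          rw [List.filter_eq_nil_iff]
          intro x hx
          rcases List.mem_cons.mp hx with rfl | hx'
          · simp; omega
          · have := hK.1 x hx'; simp; omega
        rw [this]; simp)]
      rw [pvSumConst, PySem.List.length_pyRange_one]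
      have : ((k - p0).toNat : Int) = k - p0 := by omega
      rw [this]; ring
    have e2 : ((PySem.List.pyRange k (K'.getLastD k) 1).map
        (fun t => |b0 + (((k :: K').filter (fun k => decide (k ≤ t))).map δ).sum|)).sum
        = ((PySem.List.pyRange k (K'.getLastD k) 1).map
        (fun t => |b0 + δ k + ((K'.filter (fun k => decide (k ≤ t))).map δ).sum|)).sum := by
      apply congrArg
      apply List.map_congr_left
      intro t ht
      have htr := PySem.List.mem_pyRange_one.mp ht
      rw [List.filter_cons_of_pos (by simp; omega)]
      simp only [List.map_cons, List.sum_cons]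
      ring_nf
    rw [e1, e2]
    ring

-- indicator sum over a nodup list containing x
lemma pvIndicatorSum (K : List Int) (x : Int) (p : Int → Bool)
    (hnd : K.Nodup) (hx : x ∈ K) :
    ((K.filter p).map (fun k => if k = x then (1 : Int) else 0)).sum = if p x then 1 else 0 := by
  induction K with
  | nil => simp at hx
  | cons k K' ih =>
    rw [List.nodup_cons] at hnd
    rcases List.mem_cons.mp hx with heq | hx'
    · rw [heq]
      have hz : ((K'.filter p).map (fun j => if j = k then (1 : Int) else 0)).sum = 0 := by
        apply List.sum_eq_zero
        intro y hy
        obtain ⟨j, hj, rfl⟩ := List.mem_map.mp hy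
        rw [if_neg (by rintro rfl; exact hnd.1 (List.mem_of_mem_filter hj))]
      by_cases hp : p k
      · rw [List.filter_cons_of_pos hp]
        simp only [List.map_cons, List.sum_cons, if_pos rfl, hz, if_pos hp]
        norm_num
      · rw [List.filter_cons_of_neg (by simpa using hp), hz, if_neg (by simpa using hp)]
    · have := ih hnd.2 hx'
      by_cases hp : p k
      · rw [List.filter_cons_of_pos hp]
        simp only [List.map_cons, List.sum_cons, this]
        rw [if_neg (by rintro rfl; exact hnd.1 hx')]
        ring
      · rw [List.filter_cons_of_neg (by simpa using hp)]
        exact this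

-- counting over a support list: Σ_{k ∈ K, k ≤ t} count l k = countP l (≤ t)
lemma pvCountSupport (l K : List Int) (t : Int) (hnd : K.Nodup) (hsup : ∀ x ∈ l, x ∈ K) :
    ((K.filter (fun k => decide (k ≤ t))).map (fun k => (l.count k : Int))).sum
      = (l.countP (fun x => decide (x ≤ t)) : Int) := by
  induction l with
  | nil => simp
  | cons x l' ih =>
    have ihl := ih (fun y hy => hsup y (by simp [hy]))
    have key : ((K.filter (fun k => decide (k ≤ t))).map (fun k => ((x :: l').count k : Int))).sum
        = ((K.filter (fun k => decide (k ≤ t))).map (fun k => (l'.count k : Int))).sum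
          + ((K.filter (fun k => decide (k ≤ t))).map (fun k => if k = x then (1 : Int) else 0)).sum := by
      rw [show (fun k : Int => ((x :: l').count k : Int))
          = (fun k : Int => (l'.count k : Int) + if k = x then (1:Int) else 0) from funext (fun k => by
            by_cases hk : k = x
            · subst hk; simp [List.count_cons]
            · simp [List.count_cons, hk, Ne.symm hk]), pvSumMapAdd]
    rw [key, ihl, pvIndicatorSum K x _ hnd (hsup x (by simp)), List.countP_cons]
    by_cases hx : x ≤ t <;> simp [hx] <;> push_cast <;> ring

-- every member is ≤ the last element of a (≤)-pairwise list
lemma pvLast_ge (l : List Int) (d : Int) (h : l.Pairwise (· ≤ ·)) :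
    ∀ x ∈ l, x ≤ l.getLastD d := by
  induction l generalizing d with
  | nil => simp
  | cons a t ih =>
    rw [List.pairwise_cons] at h
    intro x hx
    rcases List.mem_cons.mp hx with rfl | hx'
    · rw [List.getLastD_cons]
      cases hc : t with
      | nil => simp
      | cons b s =>
        have hmem : (b :: s).getLastD x ∈ t := by rw [hc]; exact pvGetLastD_mem b x s
        have := h.1 _ hmem
        exact this
    · rw [List.getLastD_cons]
      exact ih a h.2 x hx'

-- monotone shift through sorting
lemma pvSortedShift (l : List Int) :
    PySem.List.sorted (l.map (· - 1)) (fun x => x) false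
      = (PySem.List.sorted l (fun x => x) false).map (· - 1) := by
  apply PySem.List.sorted_id_eq_of_perm_of_pairwise
  · exact (PySem.List.sorted_perm l (fun x => x) false).map _
  · have := PySem.List.sorted_pairwise l (fun x => x)
    exact List.Pairwise.map _ (fun a b h => by omega) this

-- the value of B's sweep fold from the port's initial state (0, (0, none)), nonempty key list
lemma pvSweepTop_cons (δ : Int → Int) (k : Int) (K' : List Int)
    (hK : (k :: K').Pairwise (· < ·)) :
    ((k :: K').foldl (fun (acc : Int × Int × Option Int) p =>
        (match acc.2.2 with
         | none => acc.1
         | some prev => acc.1 + |acc.2.1| * (p - prev),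
         (acc.2.1 + δ p, some p))) (0, (0, none))).1
    = ((PySem.List.pyRange k (K'.getLastD k) 1).map
        (fun t => |(((k :: K').filter (fun j => decide (j ≤ t))).map δ).sum|)).sum := by
  rw [List.pairwise_cons] at hK
  rw [List.foldl_cons]
  have h1 := pvSweep δ K' 0 (0 + δ k) k (fun j hj => hK.1 j hj) hK.2
  simp only [zero_add] at h1 ⊢
  rw [h1]
  apply congrArg
  apply List.map_congr_left
  intro t ht
  have htr := PySem.List.mem_pyRange_one.mp ht
  rw [List.filter_cons_of_pos (by simp; omega)]
  simp only [List.map_cons, List.sum_cons]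

-- ===== VERDICT (by name: the statement is the Claim_ definition above) =====
theorem solution_spec : Claim_equal_solution := by
  intro A hD hP
  unfold Spec_solution solution solution_alt
  simp only [PySem.List.len_eq]
  rw [pvFoldA_bridge]
  have hBfold : (fun (st : List Bool × List Int) x =>
      if PySem.List.pyGetD st.1 (x - 1) false then (st.1, st.2 ++ [x])
      else (PySem.List.pySetD st.1 (x - 1) true, st.2)) = pvStepB := rfl
  rw [hBfold]
  set n := A.length with hn
  set sa := A.foldl pvStepA ((PySem.List.pyRange 0 (n : Int) 1).map (fun _ => (0 : Int)), ([] : List Int)) with hsa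
  set sb := A.foldl pvStepB (PySem.List.pyRepeat [false] (n : Int), ([] : List Int)) with hsb
  have hrep : PySem.List.pyRepeat [false] (n : Int) = List.replicate n false := by
    simp [PySem.List.pyRepeat_singleton]
  have hcounts0 : (PySem.List.pyRange 0 (n : Int) 1).map (fun _ => (0 : Int))
      = (List.replicate n false).map pvB2I := by
    rw [List.map_replicate]
    refine List.eq_replicate_iff.mpr ⟨by simp [PySem.List.length_pyRange_one], ?_⟩
    intro b hb
    obtain ⟨_, _, rfl⟩ := List.mem_map.mp hb
    simp [pvB2I]
  have hinit : pvRel n 0 ((PySem.List.pyRange 0 (n : Int) 1).map (fun _ => (0 : Int)), ([] : List Int))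
      (PySem.List.pyRepeat [false] (n : Int), ([] : List Int)) := by
    refine ⟨by dsimp only; rw [hrep]; exact hcounts0, rfl, by rw [hrep]; simp, by simp, ?_⟩
    dsimp only
    rw [hrep]
    simp [List.count_replicate]
  have hrel : pvRel n n sa sb := by
    have := pvFold_sim A n 0 _ _ (fun x hx => by
      have := hP x hx
      omega) hinit
    rw [Nat.zero_add, ← hn] at this
    exact this
  obtain ⟨hMap, hChg, hLb, hMem, hLen⟩ := hrel
  -- A's sorted duplicate targets are the sorted duplicate values shifted by one
  rw [hChg, pvSortedShift]
  -- A's second loop: skip condition counts[i] == 1 is exactly seen[i]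
  rw [pvBody_eq sa.1, ← List.foldl_filter]
  rw [show (PySem.List.pyRange 0 (n : Int) 1).filter (fun i => !(PySem.List.pyGetD sa.1 i 0 == 1)) =
      (PySem.List.pyRange 0 (n : Int) 1).filter (fun i => !(PySem.List.pyGetD sb.1 i false)) by
    apply List.filter_congr
    intro i _
    rw [hMap, pvGetD_map_b2i]
    cases h : PySem.List.pyGetD sb.1 i false <;> simp [pvB2I, h]]
  set holes := (PySem.List.pyRange 0 (n : Int) 1).filter (fun i => !(PySem.List.pyGetD sb.1 i false)) with hholes
  set E := (PySem.List.sorted sb.2 (fun x => x) false).map (· - 1) with hE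
  -- B's missing values are the holes shifted by one
  have hmiss : (PySem.List.pyRange 1 ((n : Int) + 1) 1).filter
      (fun v => !(PySem.List.pyGetD sb.1 (v - 1) false)) = holes.map (· + 1) := by
    have hr : PySem.List.pyRange 1 ((n : Int) + 1) 1
        = (PySem.List.pyRange 0 (n : Int) 1).map (· + 1) := by
      have h1 : ((n : Int) + 1 - 1).toNat = ((n : Int) - 0).toNat := by omega
      rw [PySem.List.pyRange_one, PySem.List.pyRange_one, h1, List.map_map]
      apply List.map_congr_left
      intro k _
      simp
      omega
    rw [hr, List.filter_map, hholes]
    congr 1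
    apply List.filter_congr
    intro i _
    simp
  rw [hmiss]
  set missing := holes.map (· + 1) with hmissing
  set dups := sb.2 with hdups
  -- the event dictionary
  set delta := missing.foldl (fun d v => d.modify v 0 (· - 1))
      (dups.foldl (fun d x => d.modify x 0 (· + 1)) (PySem.Dict.empty : PySem.Dict Int Int)) with hdelta
  -- event dictionary: lookups, keys, nodup
  have hgetD : ∀ v : Int, delta.getD v 0 = (dups.count v : Int) - (missing.count v : Int) := by
    intro v
    rw [hdelta, pvGetD_foldl_modify_sub_one, PySem.Dict.getD_foldl_modify_add_one]
    simp
  have hkeysmem : ∀ k : Int, k ∈ delta.keys ↔ (k ∈ dups ∨ k ∈ missing) := by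
    intro k
    rw [hdelta, PySem.Dict.keys_foldl_modify, PySem.Dict.keys_foldl_modify]
    rw [PySem.Set.mem_update, PySem.Set.mem_update]
    simp [PySem.Dict.keys_empty]
  have hnodupkeys : delta.keys.Nodup := by
    rw [hdelta]
    apply PySem.Dict.nodup_keys_foldl_modify_key (key := fun v => v)
    apply PySem.Dict.nodup_keys_foldl_modify_key (key := fun v => v)
    exact PySem.Dict.nodup_keys_empty
  set sortedD := PySem.List.sorted dups (fun x => x) false with hsortedD
  set K := PySem.List.sorted delta.keys (fun k => k) false with hK
  have hKnodup : K.Nodup := (PySem.List.sorted_perm delta.keys (fun k => k) false).symm.nodup hnodupkeys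
  have hKle : K.Pairwise (· ≤ ·) := by
    have := PySem.List.sorted_pairwise delta.keys (fun k => k)
    rw [hK]
    simpa using this
  have hKlt : K.Pairwise (· < ·) := (hKle.and hKnodup).imp (fun h => lt_of_le_of_ne h.1 h.2)
  have hKmem : ∀ j ∈ K, j ∈ dups ∨ j ∈ missing := fun j hj =>
    (hkeysmem j).mp (by rw [hK] at hj; rwa [PySem.List.mem_sorted] at hj)
  have hKmem' : ∀ j : Int, (j ∈ dups ∨ j ∈ missing) → j ∈ K := fun j hj => by
    rw [hK, PySem.List.mem_sorted]
    exact (hkeysmem j).mpr hj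
  have hmin : ∀ m t, K = m :: t → ∀ j ∈ K, m ≤ j := by
    intro m t hmt j hj
    have hj' : j ∈ delta.keys := by rw [hK, PySem.List.mem_sorted] at hj; exact hj
    have heq : PySem.List.sorted delta.keys (fun k => k) false = m :: t := by
      rw [← hK]; exact hmt
    have := PySem.List.key_head_sorted_le delta.keys (fun k => k) heq j hj'
    simpa using this
  -- bounds
  have hmissB : ∀ v ∈ missing, 1 ≤ v ∧ v ≤ (n : Int) := by
    intro v hv
    rw [hmissing] at hv
    obtain ⟨i, hi, rfl⟩ := List.mem_map.mp hv
    rw [hholes] at hi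
    have := PySem.List.mem_pyRange_one.mp (List.mem_of_mem_filter hi)
    omega
  -- lengths
  have hholelen : holes.length = dups.length := by
    rw [hholes, PySem.List.pyRange_zero_nat, List.filter_map, List.length_map,
      ← List.countP_eq_length_filter]
    have hpc : (List.range n).countP ((fun i => !(PySem.List.pyGetD sb.1 i false)) ∘ (fun k : Nat => (k : Int)))
        = (List.range n).countP (fun k => !(sb.1.getD k false)) := by
      apply List.countP_congr
      intro k hk
      simp [PySem.List.pyGetD_natCast]
    rw [hpc, ← hLb, pvCountP_range]
    have := List.count_false_add_count_true sb.1
    omega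
  have hElen : E.length = dups.length := by
    rw [hE, List.length_map, hsortedD, PySem.List.length_sorted]
  have hmislen : missing.length = holes.length := by rw [hmissing, List.length_map]
  -- A's early-exit loop = cap(S)
  have hloop := pvLoop2 E holes 0 0 (by omega) (by norm_num)
  rw [Nat.cast_zero, List.drop_zero] at hloop
  simp only [zero_add] at hloop
  rw [hloop]
  set S := ((holes.zip E).map (fun p => |p.2 - p.1|)).sum with hS
  -- B's sweep fold body in the shape of pvSweep
  have hBbody : (fun (acc : Int × Int × Option Int) p =>
      let cost := match acc.2.2 with
        | none => acc.1
        | some prev => acc.1 + |acc.2.1| * (p - prev)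
      (cost, (acc.2.1 + delta.getD p 0, some p)))
      = (fun (acc : Int × Int × Option Int) p =>
        (match acc.2.2 with
         | none => acc.1
         | some prev => acc.1 + |acc.2.1| * (p - prev),
         (acc.2.1 + (fun q => delta.getD q 0) p, some p))) := rfl
  rw [hBbody]
  -- S equals the range integral of |count difference|
  set lo := 1 - (n : Int) with hlo
  set hi := (n : Int) + 1 with hhi
  set F := fun t : Int => |((dups.countP (fun x => decide (x ≤ t)) : Int))
      - ((missing.countP (fun x => decide (x ≤ t)) : Int))| with hF
  have hSrange : S = ((PySem.List.pyRange lo hi 1).map F).sum := by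
    have hzip : S = ((missing.zip sortedD).map (fun p => |p.2 - p.1|)).sum := by
      rw [hS, hE, hmissing, List.zip_map_right, List.zip_map_left,
        List.map_map, List.map_map]
      apply congrArg
      apply List.map_congr_left
      intro p _
      show |p.2 - 1 - p.1| = |p.2 - (p.1 + 1)|
      congr 1
      ring
    have hWa : sortedD.Pairwise (· ≤ ·) := by
      have := PySem.List.sorted_pairwise dups (fun x => x)
      rw [hsortedD]
      simpa using this
    have hWb : missing.Pairwise (· ≤ ·) := by
      rw [hmissing, hholes]
      exact List.Pairwise.map _ (fun a b (h : a < b) => by omega)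
        ((PySem.List.pairwise_lt_pyRange_one 0 (n : Int)).filter _)
    have hWlen : missing.length = sortedD.length := by
      rw [hmislen, hholelen, hsortedD, PySem.List.length_sorted]
    have hWba : ∀ x ∈ sortedD, lo ≤ x ∧ x < hi := by
      intro x hx
      rw [hsortedD, PySem.List.mem_sorted] at hx
      have := hMem x hx
      omega
    have hWbb : ∀ x ∈ missing, lo ≤ x ∧ x < hi := by
      intro x hx
      have := hmissB x hx
      omega
    rw [hzip, pvWasserstein sortedD missing lo hi hWa hWb hWlen hWba hWbb]
    apply congrArg
    apply List.map_congr_left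
    intro t _
    simp only [hF]
    have hperm := (PySem.List.sorted_perm dups (fun x => x) false).countP_eq (fun x => decide (x ≤ t))
    rw [← hsortedD] at hperm
    rw [hperm]
  clear_value K
  cases K with
  | nil =>
    -- no events at all: no duplicates and no missing values
    have hdupsnil : dups = [] := by
      rw [List.eq_nil_iff_forall_not_mem]
      intro x hx
      exact (List.not_mem_nil).elim (hKmem' x (Or.inl hx))
    have hmissnil : missing = [] := by
      rw [List.eq_nil_iff_forall_not_mem]
      intro x hx
      exact (List.not_mem_nil).elim (hKmem' x (Or.inr hx))
    have hholesnil : holes = [] := by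
      have := hmislen
      rw [hmissnil] at this
      exact List.eq_nil_of_length_eq_zero (by simpa using this.symm)
    have hS0 : S = 0 := by rw [hS, hholesnil]; simp
    rw [List.foldl_nil, hS0]
    norm_num
  | cons k K' =>
    rw [pvSweepTop_cons (fun q => delta.getD q 0) k K' hKlt]
    -- the sweep integral over [k, last] equals the integral over [lo, hi)
    have hkK : k ∈ k :: K' := by simp
    set L := K'.getLastD k with hL
    have hLK : L ∈ k :: K' := by
      rw [hL, ← pvGetLastD_cons k k K']
      exact pvGetLastD_mem k k K'
    have hbound : ∀ j ∈ k :: K', lo ≤ j ∧ j < hi := by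
      intro j hj
      rcases hKmem j hj with hjd | hjm
      · have := hMem j hjd
        omega
      · have := hmissB j hjm
        omega
    have hxle : ∀ j ∈ k :: K', j ≤ L := by
      intro j hj
      have := pvLast_ge (k :: K') k (hKlt.imp le_of_lt) j hj
      rw [pvGetLastD_cons k k K'] at this
      rw [hL]
      exact this
    have hkL : k ≤ L := hxle k hkK
    have hinner : ∀ t : Int, (((k :: K').filter (fun j => decide (j ≤ t))).map (fun q => delta.getD q 0)).sum
        = (dups.countP (fun x => decide (x ≤ t)) : Int) - (missing.countP (fun x => decide (x ≤ t)) : Int) := by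
      intro t
      rw [List.map_congr_left (g := fun q => ((dups.count q : Int) - (missing.count q : Int)))
        (fun q _ => hgetD q), pvSumMapSub,
        pvCountSupport dups (k :: K') t hKnodup (fun x hx => hKmem' x (Or.inl hx)),
        pvCountSupport missing (k :: K') t hKnodup (fun x hx => hKmem' x (Or.inr hx))]
    have hsweep : ((PySem.List.pyRange k L 1).map
        (fun t => |(((k :: K').filter (fun j => decide (j ≤ t))).map (fun q => delta.getD q 0)).sum|)).sum
        = ((PySem.List.pyRange k L 1).map F).sum := by
      apply congrArg
      apply List.map_congr_left
      intro t _
      rw [hinner t]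
    have hsplit : ((PySem.List.pyRange lo hi 1).map F).sum = ((PySem.List.pyRange k L 1).map F).sum := by
      rw [PySem.List.pyRange_one_append lo k hi (hbound k hkK).1 (by have := hbound k hkK; omega),
        PySem.List.pyRange_one_append k L hi hkL (by have := hbound L hLK; omega)]
      simp only [List.map_append, List.sum_append]
      have hz1 : ((PySem.List.pyRange lo k 1).map F).sum = 0 := by
        apply List.sum_eq_zero
        intro y hy
        obtain ⟨t, ht, rfl⟩ := List.mem_map.mp hy
        have htr := PySem.List.mem_pyRange_one.mp ht
        simp only [hF]
        have hcd : dups.countP (fun x => decide (x ≤ t)) = 0 := by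
          rw [List.countP_eq_zero]
          intro x hx
          have := hmin k K' rfl x (hKmem' x (Or.inl hx))
          simp only [decide_eq_true_eq]
          omega
        have hcm : missing.countP (fun x => decide (x ≤ t)) = 0 := by
          rw [List.countP_eq_zero]
          intro x hx
          have := hmin k K' rfl x (hKmem' x (Or.inr hx))
          simp only [decide_eq_true_eq]
          omega
        rw [hcd, hcm]
        simp
      have hz3 : ((PySem.List.pyRange L hi 1).map F).sum = 0 := by
        apply List.sum_eq_zero
        intro y hy
        obtain ⟨t, ht, rfl⟩ := List.mem_map.mp hy
        have htr := PySem.List.mem_pyRange_one.mp ht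
        simp only [hF]
        have hcd : dups.countP (fun x => decide (x ≤ t)) = dups.length := by
          rw [List.countP_eq_length]
          intro x hx
          have := hxle x (hKmem' x (Or.inl hx))
          simp only [decide_eq_true_eq]
          omega
        have hcm : missing.countP (fun x => decide (x ≤ t)) = missing.length := by
          rw [List.countP_eq_length]
          intro x hx
          have := hxle x (hKmem' x (Or.inr hx))
          simp only [decide_eq_true_eq]
          omega
        rw [hcd, hcm, hmislen, hholelen]
        simp
      rw [hz1, hz3]
      ring
    rw [hsweep, ← hsplit, ← hSrange]
    by_cases hbig : (1000000000 : Int) < S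
    · rw [if_pos hbig, if_pos hbig]
    · rw [if_neg hbig, if_neg hbig]
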